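-- pv_equiv track=rewrite | github.com/miliar/Code_Jam_Webscraper | solutions_python/Problem_178/2820.py | checkStack
-- ===== SOURCE A (Python) =====
-- def flipIt(pancakes):
--     for i in range(len(pancakes)):
--         if pancakes[i] == "+":
--             pancakes[i] = "-"
--         else:
--             pancakes[i] = "+"
--     return pancakes
--
-- def checkStack(pancakes):
--
--     topCake = pancakes[0]
--
--     for i in range(len(pancakes)):
--
--         if pancakes[i] == topCake:
--             continue
--
--         if pancakes[i] != topCake:
--             splitStack = pancakes[:i]
--             splitStack.reverse()
--
--             flippedStack = flipIt(splitStack)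
--
--             newStack = flippedStack + pancakes[i:]
--             return newStack
-- ===== SOURCE B (Python) =====
-- def checkStack(pancakes):
--     top = pancakes[0]
--     flip = "-" if top == "+" else "+"
--
--     def go(xs):
--         # recursion on the stack: peel one pancake, flip it on the way back
--         if not xs:
--             return None
--         if xs[0] != top:
--             return list(xs)
--         rest = go(xs[1:])
--         return None if rest is None else [flip] + rest
--
--     return go(pancakes)
-- ===== Notes on version B (the rewrite author's own statement) =====
-- stated objective: simpler
-- what changed: B is recursive instead of A's index loop: it peels pancakes off the stack until one differs from the top, and on the way back out of the recursion prepends one flipped-top symbol per peeled pancake, so A's slice/reverse and the flipIt helper disappear.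
-- outside the precondition, e.g. on checkStack([]): A raises IndexError, B raises IndexError
import Mathlib
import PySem

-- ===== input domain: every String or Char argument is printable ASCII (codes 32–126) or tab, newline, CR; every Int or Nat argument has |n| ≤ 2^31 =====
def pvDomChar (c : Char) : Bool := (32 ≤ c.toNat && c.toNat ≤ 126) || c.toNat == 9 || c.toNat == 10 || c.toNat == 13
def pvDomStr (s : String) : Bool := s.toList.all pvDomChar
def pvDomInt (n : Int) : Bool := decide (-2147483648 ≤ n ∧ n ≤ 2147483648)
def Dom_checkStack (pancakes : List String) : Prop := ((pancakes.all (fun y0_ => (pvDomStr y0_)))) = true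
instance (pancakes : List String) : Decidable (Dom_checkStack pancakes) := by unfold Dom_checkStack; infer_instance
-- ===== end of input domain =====

-- B replaces A's index loop with reverse-then-flipIt of the prefix slice by a structural
-- recursion that peels pancakes and prepends one flipped symbol per peeled pancake on the
-- way back; objective: simpler.

-- ===== PORT A =====
def flipIt (pancakes : List String) : List String :=
  -- in-place loop over indices; each cell becomes "-" if it was "+", else "+"
  pancakes.map (fun p => if p == "+" then "-" else "+")

-- the 'for i in range(len(pancakes))' loop of checkStack, from index i
def checkStackGo (pancakes : List String) (topCake : String) (i : Nat) :
    Option (List String) :=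
  if h : i < pancakes.length then
    if pancakes[i] == topCake then
      checkStackGo pancakes topCake (i + 1)
    else
      -- pancakes[:i] = take i, pancakes[i:] = drop i (0 ≤ i ≤ len, exact)
      some (flipIt ((pancakes.take i).reverse) ++ pancakes.drop i)
  else
    none
  termination_by pancakes.length - i

def checkStack (pancakes : List String) : Option (List String) :=
  match pancakes.head? with
  | none => none            -- Python raises IndexError here; excluded by Pre_
  | some topCake => checkStackGo pancakes topCake 0

-- ===== PORT B =====
-- Source B's inner 'go': recursion on the stack, flipping one pancake on the way back
def checkGoAlt (top flip : String) : List String → Option (List String)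
  | [] => none
  | x :: xs =>
    if x != top then some (x :: xs)
    else
      match checkGoAlt top flip xs with
      | none => none
      | some rest => some (flip :: rest)

def checkStack_alt (pancakes : List String) : Option (List String) :=
  match pancakes with
  | [] => none              -- Python raises IndexError at pancakes[0]; excluded by Pre_
  | top :: _ =>
    let flip := if top == "+" then "-" else "+"
    checkGoAlt top flip pancakes

-- ===== PRECONDITION & SPEC =====
-- Pre_ excludes only the empty list, on which both Pythons raise IndexError at pancakes[0].
def Pre_checkStack (pancakes : List String) : Prop := pancakes ≠ []
instance (pancakes : List String) : Decidable (Pre_checkStack pancakes) := by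
  unfold Pre_checkStack; infer_instance
def pvWitness_checkStack : List String := ["+", "+", "-"]

def Spec_checkStack (pancakes : List String) (out : Option (List String)) : Prop := out = checkStack_alt pancakes
instance (pancakes : List String) (out : Option (List String)) : Decidable (Spec_checkStack pancakes out) := by unfold Spec_checkStack; infer_instance

-- ===== CLAIM (what is proved, stated in full; the proofs are below) =====
def Claim_equal_checkStack : Prop := ∀ (pancakes : List String), Dom_checkStack pancakes → Pre_checkStack pancakes → Spec_checkStack pancakes (checkStack pancakes)

-- ===== LEMMAS AND PROOFS =====

lemma flipIt_replicate (n : Nat) (s : String) :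
    flipIt (List.replicate n s) = List.replicate n (if s == "+" then "-" else "+") := by
  simp [flipIt]

-- common characterisation: first differing index k ↦ k flipped symbols ++ suffix
-- loop invariant for A's loop: everything before i equals topCake
lemma checkStackGo_eq (pancakes : List String) (top : String) (i : Nat)
    (hpref : ∀ j, j < i → ∀ (hl : j < pancakes.length), pancakes[j] = top) :
    checkStackGo pancakes top i =
      match pancakes.findIdx? (fun p => p != top) with
      | none => none
      | some k => some (List.replicate k (if top == "+" then "-" else "+") ++ pancakes.drop k) := by
  by_cases h : i < pancakes.length
  · rw [checkStackGo]
    simp only [h, dif_pos]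
    by_cases he : pancakes[i] == top
    · rw [if_pos he]
      refine checkStackGo_eq pancakes top (i + 1) ?_
      intro j hj hl
      rcases Nat.lt_succ_iff_lt_or_eq.mp hj with hj' | rfl
      · exact hpref j hj' hl
      · exact eq_of_beq he
    · rw [if_neg he]
      have hfind : pancakes.findIdx? (fun p => p != top) = some i := by
        rw [List.findIdx?_eq_some_iff_getElem]
        exact ⟨h, by simpa using he, fun j hj => by simp [hpref j hj (hj.trans h)]⟩
      rw [hfind]
      have htake : pancakes.take i = List.replicate i top := by
        apply List.ext_getElem
        · simp [Nat.le_of_lt h]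
        · intro j h1 h2
          simp only [List.getElem_take, List.getElem_replicate]
          exact hpref j (by simpa using h2) (by simp at h1; omega)
      rw [htake, List.reverse_replicate, flipIt_replicate]
  · rw [checkStackGo]
    simp only [h, dif_neg, not_false_iff]
    have hfind : pancakes.findIdx? (fun p => p != top) = none := by
      rw [List.findIdx?_eq_none_iff]
      intro x hx
      obtain ⟨j, hj, rfl⟩ := List.getElem_of_mem hx
      simp [hpref j (by omega) hj]
    rw [hfind]
  termination_by pancakes.length - i

-- B's recursion satisfies the same characterisation
lemma checkGoAlt_eq (top flip : String) (xs : List String) :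
    checkGoAlt top flip xs =
      match xs.findIdx? (fun p => p != top) with
      | none => none
      | some k => some (List.replicate k flip ++ xs.drop k) := by
  induction xs with
  | nil => rfl
  | cons x t ih =>
    rw [checkGoAlt, List.findIdx?_cons]
    by_cases hx : x != top
    · simp [hx]
    · have hx' : x = top := by simpa using hx
      rw [if_neg hx, if_neg (by simpa using hx), ih]
      cases hf : t.findIdx? (fun p => p != top) with
      | none => simp
      | some k => simp [List.replicate_succ]

-- ===== VERDICT (by name: the statement is the Claim_ definition above) =====
theorem checkStack_spec : Claim_equal_checkStack := by
  intro pancakes _ hpre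
  unfold Spec_checkStack
  cases pancakes with
  | nil => exact absurd rfl hpre
  | cons top rest =>
    show checkStackGo (top :: rest) top 0 = _
    rw [checkStackGo_eq (top :: rest) top 0 (fun j hj _ => absurd hj (Nat.not_lt_zero j)),
        checkStack_alt]
    simp only [checkGoAlt_eq]
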